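-- pv_equiv track=rewrite | github.com/mvrogozov/algorithms | contest/practicum/Algorithms/weather_chaos.py | w_chaos
-- ===== SOURCE A (Python) =====
-- def w_chaos(n,t):
--     days = 0
--     if n == 0:
--         return 0
--     if n == 1:
--         return 1
--     t0 =t[0]
--     t1 =t[1]
--     if t[0] > t[1]:
--         days = 1
--     for i in range(1, n):
--         if t[i-1] < t[i]:
--             if i < n - 1:
--                 if t[i+1] < t[i]:
--                     days += 1
--             else:
--                 days += 1
--     return days
-- ===== SOURCE B (Python) =====
-- def w_chaos(n, t):
--     if n <= 0:
--         return 0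
--     u = t[:n]
--     signs = [1] + [(1 if b > a else (-1 if b < a else 0)) for a, b in zip(u, u[1:])] + [-1]
--     return sum(1 for s1, s2 in zip(signs, signs[1:]) if s1 == 1 and s2 == -1)
-- ===== Notes on version B (the rewrite author's own statement) =====
-- stated objective: alternative
-- what changed: Instead of A's single indexed loop with three special cases, B works in staged passes: it derives a sign sequence of adjacent rises/falls, sandwiches it between +1/-1 sentinels, and counts adjacent rise-then-fall transitions with zip; no index arithmetic or boundary branches remain.
-- outside the precondition, e.g. on w_chaos(-2, [3, 1]): A returns 1, B returns 0
import Mathlib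
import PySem

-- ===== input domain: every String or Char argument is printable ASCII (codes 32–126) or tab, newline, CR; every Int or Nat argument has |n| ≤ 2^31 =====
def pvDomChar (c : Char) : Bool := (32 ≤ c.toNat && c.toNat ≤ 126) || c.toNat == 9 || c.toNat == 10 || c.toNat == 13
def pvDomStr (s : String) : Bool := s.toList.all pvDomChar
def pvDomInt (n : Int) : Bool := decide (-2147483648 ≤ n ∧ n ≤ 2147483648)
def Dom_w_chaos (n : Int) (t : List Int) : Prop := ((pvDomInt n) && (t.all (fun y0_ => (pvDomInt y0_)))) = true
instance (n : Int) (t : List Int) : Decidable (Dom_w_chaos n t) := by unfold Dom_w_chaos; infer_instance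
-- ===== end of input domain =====

-- B replaces A's single indexed pass with special cases by staged passes: build a sign sequence
-- (rise/fall of adjacent pairs) with sentinels, then count rise->fall transitions; different decomposition, same O(n) cost.


-- ===== PORT A =====
-- t[i] with PySem.List.pyGetD (default 0): inside Pre_w_chaos every access A makes is in range.
def w_chaos (n : Int) (t : List Int) : Int :=
  if n = 0 then 0
  else if n = 1 then 1
  else
    let days : Int := if PySem.List.pyGetD t 0 0 > PySem.List.pyGetD t 1 0 then 1 else 0
    (PySem.List.pyRange 1 n 1).foldl (fun days i =>
      if PySem.List.pyGetD t (i - 1) 0 < PySem.List.pyGetD t i 0 then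
        if i < n - 1 then
          if PySem.List.pyGetD t (i + 1) 0 < PySem.List.pyGetD t i 0 then days + 1 else days
        else days + 1
      else days) days

-- ===== PORT B =====
-- staged passes: u = t[:n]; signs = [1] ++ sign of each adjacent pair ++ [-1]; count adjacent (1,-1) pairs.
def w_chaos_alt (n : Int) (t : List Int) : Int :=
  if n ≤ 0 then 0
  else
    let u := PySem.List.slice t none (some n)
    let signs : List Int :=
      [1] ++ (List.zip u (PySem.List.slice u (some 1) none)).map
               (fun p => if p.2 > p.1 then (1 : Int) else if p.2 < p.1 then -1 else 0) ++ [-1]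
    (List.zip signs (PySem.List.slice signs (some 1) none)).foldl
      (fun acc p => if p.1 = 1 ∧ p.2 = -1 then acc + 1 else acc) 0

-- ===== PRECONDITION & SPEC =====
-- Pre_ excludes (a) 2 ≤ n > len(t), where A raises IndexError, and (b) negative n (outside the
-- task's natural domain of day counts), on which A's returned value is only the leftover of its
-- t[0]>t[1] initialisation although the loop never runs.
def Pre_w_chaos (n : Int) (t : List Int) : Prop := 0 ≤ n ∧ (n ≤ 1 ∨ n ≤ (t.length : Int))
instance (n : Int) (t : List Int) : Decidable (Pre_w_chaos n t) := by unfold Pre_w_chaos; infer_instance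
def pvWitness_w_chaos : Int × List Int := (3, [1, 5, 2])
def Spec_w_chaos (n : Int) (t : List Int) (out : Int) : Prop := out = w_chaos_alt n t
instance (n : Int) (t : List Int) (out : Int) : Decidable (Spec_w_chaos n t out) := by unfold Spec_w_chaos; infer_instance

-- ===== CLAIM (what is proved, stated in full; the proofs are below) =====
def Claim_equal_w_chaos : Prop := ∀ (n : Int) (t : List Int), Dom_w_chaos n t → Pre_w_chaos n t → Spec_w_chaos n t (w_chaos n t)

-- ===== LEMMAS AND PROOFS =====

-- sign of an adjacent step, as B computes it
def pvSgn (a b : Int) : Int := if b > a then 1 else if b < a then -1 else 0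

-- the sign list of consecutive pairs of (a :: r)
def pvSgnL : Int → List Int → List Int
  | _, [] => []
  | a, b :: r => pvSgn a b :: pvSgnL b r

-- count of adjacent (1,-1) pairs
def pvCp : List Int → Int
  | [] => 0
  | [_] => 0
  | x :: y :: r => (if x = 1 ∧ y = -1 then 1 else 0) + pvCp (y :: r)

-- reference count: s is the sign of the step into a, r the remaining elements
def pvCnt : Int → Int → List Int → Int
  | s, _, [] => if s = 1 then 1 else 0
  | s, a, b :: r => (if s = 1 ∧ b < a then 1 else 0) + pvCnt (pvSgn a b) b r

theorem pvSgn_eq_one (a b : Int) : (pvSgn a b = 1) ↔ a < b := by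
  unfold pvSgn; split_ifs with h1 h2 <;> constructor <;> intro h <;> first | exact h.elim | omega

theorem pvSgn_eq_neg_one (a b : Int) : (pvSgn a b = -1) ↔ b < a := by
  unfold pvSgn; split_ifs with h1 h2 <;> constructor <;> intro h <;> first | exact h.elim | omega

theorem pvMapZip (a : Int) (r : List Int) :
    (List.zip (a :: r) r).map
      (fun p : Int × Int => if p.2 > p.1 then (1 : Int) else if p.2 < p.1 then -1 else 0)
      = pvSgnL a r := by
  induction r generalizing a with
  | nil => simp [pvSgnL]
  | cons b r ih => simpa [pvSgnL, pvSgn] using ih b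

theorem pvFoldl_cp (l : List Int) (x acc : Int) :
    (List.zip (x :: l) l).foldl (fun acc p => if p.1 = 1 ∧ p.2 = -1 then acc + 1 else acc) acc
      = acc + pvCp (x :: l) := by
  induction l generalizing x acc with
  | nil => simp [pvCp]
  | cons y r ih =>
    simp only [List.zip_cons_cons, List.foldl_cons]
    rw [ih]
    simp only [pvCp]
    split_ifs <;> omega

theorem pvCp_sgnL (r : List Int) (a s : Int) :
    pvCp ((s :: pvSgnL a r) ++ [-1]) = pvCnt s a r := by
  induction r generalizing a s with
  | nil => simp [pvSgnL, pvCp, pvCnt]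
  | cons b r ih =>
    simp only [pvSgnL, List.cons_append, pvCp, pvCnt, pvSgn_eq_neg_one]
    rw [← List.cons_append, ih b (pvSgn a b)]

-- B on 1 ≤ n, u = a :: r equals the reference count
theorem pvB_eq_cnt (n : Int) (t : List Int) (a : Int) (r : List Int)
    (hn : ¬ n ≤ 0) (hu : PySem.List.slice t none (some n) = a :: r) :
    w_chaos_alt n t = pvCnt 1 a r := by
  unfold w_chaos_alt
  rw [if_neg hn]
  simp only [hu, PySem.List.slice_from_one, List.tail_cons, List.cons_append, List.nil_append]
  rw [pvMapZip a r, pvFoldl_cp (pvSgnL a r ++ [-1]) 1 0, ← List.cons_append, pvCp_sgnL]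
  omega

-- A's loop from index j equals the reference count, given 1 ≤ j < n
theorem pvLoopA (t : List Int) (n : Int) :
    ∀ (k : Nat) (j acc : Int), 1 ≤ j → n = j + (k + 1) →
      (PySem.List.pyRange j n 1).foldl (fun days i =>
        if PySem.List.pyGetD t (i - 1) 0 < PySem.List.pyGetD t i 0 then
          if i < n - 1 then
            if PySem.List.pyGetD t (i + 1) 0 < PySem.List.pyGetD t i 0 then days + 1 else days
          else days + 1
        else days) acc
      = acc + pvCnt (pvSgn (PySem.List.pyGetD t (j - 1) 0) (PySem.List.pyGetD t j 0))
                    (PySem.List.pyGetD t j 0)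
                    ((PySem.List.pyRange (j + 1) n 1).map (fun i => PySem.List.pyGetD t i 0)) := by
  intro k
  induction k with
  | zero =>
    intro j acc hj hnj
    rw [show n = j + 1 from by omega]
    rw [PySem.List.pyRange_one_cons (by omega), PySem.List.pyRange_one_eq_nil (by omega)]
    simp only [List.foldl_cons, List.foldl_nil, List.map_nil, pvCnt, pvSgn_eq_one]
    split_ifs <;> omega
  | succ k ih =>
    intro j acc hj hnj
    rw [PySem.List.pyRange_one_cons (a := j) (by omega), List.foldl_cons,
        ih (j + 1) _ (by omega) (by omega)]
    rw [PySem.List.pyRange_one_cons (a := j + 1) (b := n) (by omega), List.map_cons]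
    simp only [pvCnt, show j + 1 - 1 = j from by omega, pvSgn_eq_one]
    split_ifs <;> omega

-- tail of the sliced prefix as A's index map, given 0 ≤ a, n ≤ len t
theorem pvMapRange (t : List Int) (n a : Int) (ha : 0 ≤ a) (h : 0 ≤ n) (hn : n ≤ (t.length : Int)) :
    (PySem.List.pyRange a n 1).map (fun i => PySem.List.pyGetD t i 0)
      = (PySem.List.slice t none (some n)).drop a.toNat := by
  have hu : PySem.List.slice t none (some n) = t.take n.toNat := PySem.List.slice_to t h
  have hlen : ((t.take n.toNat).length : Int) = n := by
      simp [List.length_take]; omega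
  rw [hu, ← PySem.List.map_pyGetD_pyRange (xs := t.take n.toNat) (d := 0) (a := a) ha]
  rw [show PySem.List.len (List.take n.toNat t) = n from by rw [PySem.List.len_eq]; exact hlen]
  apply List.map_congr_left
  intro i hi
  have hmem := (PySem.List.mem_pyRange_one).1 hi
  rw [PySem.List.pyGetD_eq_getElem t 0 (by omega) (by omega),
      PySem.List.pyGetD_eq_getElem (t.take n.toNat) 0 (by omega) (by omega)]
  simp [List.getElem_take]

-- ===== VERDICT (by name: the statement is the Claim_ definition above) =====
theorem w_chaos_spec : Claim_equal_w_chaos := by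
  intro n t _ hpre
  obtain ⟨hn0, hcase⟩ := hpre
  unfold Spec_w_chaos
  by_cases h0 : n = 0
  · subst h0; simp [w_chaos, w_chaos_alt]
  by_cases h1 : n = 1
  · subst h1
    rw [show w_chaos 1 t = 1 from by simp [w_chaos]]
    unfold w_chaos_alt
    rw [if_neg (by omega), PySem.List.slice_to t (by omega)]
    cases t <;> simp [PySem.List.slice_from_one]
  -- 2 ≤ n ≤ len t
  have hn2 : 2 ≤ n := by omega
  have hlen : n ≤ (t.length : Int) := by omega
  have hu : PySem.List.slice t none (some n) = t.take n.toNat := PySem.List.slice_to t (by omega)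
  obtain ⟨x, y, t', ht⟩ : ∃ x y t', t = x :: y :: t' := by
    cases t with
    | nil => simp at hlen; omega
    | cons x s =>
      cases s with
      | nil => simp at hlen; omega
      | cons y t' => exact ⟨x, y, t', rfl⟩
  have htake : t.take n.toNat = x :: y :: t'.take (n.toNat - 2) := by
    rw [ht, show n.toNat = (n.toNat - 2) + 1 + 1 from by omega]
    simp
  have hx : PySem.List.pyGetD t 0 0 = x := by rw [ht]; simp [pysem]
  have hy : PySem.List.pyGetD t 1 0 = y := by rw [ht]; simp [pysem]
  rw [pvB_eq_cnt n t x (y :: t'.take (n.toNat - 2)) (by omega) (by rw [hu, htake])]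
  unfold w_chaos
  rw [if_neg h0, if_neg h1]
  rw [pvLoopA t n (n - 2).toNat 1 _ (by omega) (by omega)]
  rw [show (1 : Int) + 1 = 2 from by norm_num, show (1 : Int) - 1 = 0 from by norm_num]
  rw [pvMapRange t n 2 (by omega) (by omega) hlen, hu, htake]
  rw [show ((2 : Int)).toNat = 2 from rfl]
  simp only [List.drop_succ_cons, List.drop_zero]
  rw [hx, hy]
  simp only [pvCnt]
  norm_num
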